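-- pv_equiv track=rewrite | github.com/medialab/ural | ural/tld.py | get_suffix_lists
-- ===== SOURCE A (Python) =====
-- def suffix_list_iter(txt):
--     in_private_section = False
--
--     for line in txt.split("\n"):
--
--         # Private section
--         if "===BEGIN PRIVATE DOMAINS===" in line:
--             in_private_section = True
--
--         # Puny code version
--         if "// xn--" in line:
--             line = line.split()[1]
--
--         line = line.strip()
--
--         # Comments and paragraph breaks
--         if not line or line[0] in ("/", "\n"):
--             continue
--
--         yield in_private_section, line
--
-- def get_suffix_lists(txt):
--     public_list = []
--     private_list = []
--
--     for private, suffix in suffix_list_iter(txt):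
--         if private:
--             private_list.append(suffix)
--         else:
--             public_list.append(suffix)
--
--     return public_list, private_list
-- ===== SOURCE B (Python) =====
-- def get_suffix_lists(txt):
--     lines = txt.split("\n")
--     # boundary-first: index of the first line containing the private marker
--     i = next((k for k, l in enumerate(lines)
--               if "===BEGIN PRIVATE DOMAINS===" in l), len(lines))
--
--     def parse(region):
--         out = []
--         for line in region:
--             if "// xn--" in line:
--                 line = line.split()[1]
--             line = line.strip()
--             if line and line[0] not in ("/", "\n"):
--                 out.append(line)
--         return out
--
--     return parse(lines[:i]), parse(lines[i:])
-- ===== Notes on version B (the rewrite author's own statement) =====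
-- stated objective: alternative
-- what changed: Replaces the stateful generator/consumer with a flag carried across all lines by a boundary-first decomposition: find the index of the first line containing the private marker, then parse the lines before it as the public list and the lines from it on as the private list with a stateless per-line filter.
import Mathlib
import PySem

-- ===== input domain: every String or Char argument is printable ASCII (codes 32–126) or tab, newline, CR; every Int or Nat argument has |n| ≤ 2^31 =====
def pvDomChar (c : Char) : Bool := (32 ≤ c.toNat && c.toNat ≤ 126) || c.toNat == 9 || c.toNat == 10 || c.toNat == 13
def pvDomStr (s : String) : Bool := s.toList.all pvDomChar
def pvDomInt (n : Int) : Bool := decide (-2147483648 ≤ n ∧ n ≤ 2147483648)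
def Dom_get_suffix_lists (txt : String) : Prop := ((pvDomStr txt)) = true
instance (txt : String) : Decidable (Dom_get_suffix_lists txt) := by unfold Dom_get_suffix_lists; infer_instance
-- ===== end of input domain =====

-- B replaces A's generator carrying a monotone in_private flag by a boundary-first decomposition:
-- find the first marker line's index, then filter the two regions separately (alternative, same cost).

-- ===== PORT A =====
-- loop body of get_suffix_lists consuming suffix_list_iter; state = (in_private_section, public_list, private_list)
def pvStepA (st : Bool × List String × List String) (line : String) : Bool × List String × List String :=
  let inPriv := if PySem.Str.isIn "===BEGIN PRIVATE DOMAINS===" line then true else st.1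
  -- line.split()[1]: the .getD fallback is unreachable, a line containing "// xn--" has ≥ 2 tokens
  let line1 := if PySem.Str.isIn "// xn--" line then ((PySem.List.pyGet? (PySem.Str.split₀ line) 1).getD line) else line
  let line2 := PySem.Str.strip line1
  if line2 = "" ∨ PySem.Str.pyGet? line2 0 = some '/' ∨ PySem.Str.pyGet? line2 0 = some '\n' then
    (inPriv, st.2.1, st.2.2)
  else if inPriv then (inPriv, st.2.1, st.2.2 ++ [line2])
  else (inPriv, st.2.1 ++ [line2], st.2.2)

def get_suffix_lists (txt : String) : List String × List String :=
  -- txt.split("\n"): sep is the nonempty literal "\n", so split? is some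
  let r := ((PySem.Str.split? txt "\n").getD []).foldl pvStepA (false, [], [])
  (r.2.1, r.2.2)

-- ===== PORT B =====
-- parse's per-line normalization/filter (stateless): some suffix to keep, none to skip
def pvKeep (line : String) : Option String :=
  let line1 := if PySem.Str.isIn "// xn--" line then ((PySem.List.pyGet? (PySem.Str.split₀ line) 1).getD line) else line
  let line2 := PySem.Str.strip line1
  if line2 ≠ "" ∧ PySem.Str.pyGet? line2 0 ≠ some '/' ∧ PySem.Str.pyGet? line2 0 ≠ some '\n' then some line2 else none

def get_suffix_lists_alt (txt : String) : List String × List String :=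
  let lines := (PySem.Str.split? txt "\n").getD []   -- sep "\n" is nonempty, so split? is some
  let i := lines.findIdx (fun l => PySem.Str.isIn "===BEGIN PRIVATE DOMAINS===" l)
  ((lines.take i).filterMap pvKeep, (lines.drop i).filterMap pvKeep)

-- ===== PRECONDITION & SPEC =====
def Spec_get_suffix_lists (txt : String) (out : List String × List String) : Prop := out = get_suffix_lists_alt txt
instance (txt : String) (out : List String × List String) : Decidable (Spec_get_suffix_lists txt out) := by unfold Spec_get_suffix_lists; infer_instance

-- ===== CLAIM (what is proved, stated in full; the proofs are below) =====
def Claim_equal_get_suffix_lists : Prop := ∀ (txt : String), Dom_get_suffix_lists txt → Spec_get_suffix_lists txt (get_suffix_lists txt)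

-- ===== LEMMAS AND PROOFS =====

-- A's flag update, factored for the proofs
def pvFlag (b : Bool) (line : String) : Bool :=
  if PySem.Str.isIn "===BEGIN PRIVATE DOMAINS===" line then true else b

theorem pvStepA_eq (b : Bool) (pub priv : List String) (line : String) :
    pvStepA (b, pub, priv) line =
      (pvFlag b line,
       pub ++ (if pvFlag b line then [] else (pvKeep line).toList),
       priv ++ (if pvFlag b line then (pvKeep line).toList else [])) := by
  simp only [pvStepA, pvKeep, pvFlag]
  generalize (PySem.Str.strip (if PySem.Str.isIn "// xn--" line = true then ((PySem.List.pyGet? (PySem.Str.split₀ line) 1).getD line) else line)) = s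
  split_ifs <;> first
    | rfl
    | (exfalso; tauto)
    | simp [Option.toList]

theorem pvStepA_of_flag_true (b : Bool) (pub priv : List String) (line : String)
    (h : pvFlag b line = true) :
    pvStepA (b, pub, priv) line = (true, pub, priv ++ (pvKeep line).toList) := by
  rw [pvStepA_eq, h]
  simp

theorem pvStepA_of_flag_false (b : Bool) (pub priv : List String) (line : String)
    (h : pvFlag b line = false) :
    pvStepA (b, pub, priv) line = (false, pub ++ (pvKeep line).toList, priv) := by
  rw [pvStepA_eq, h]
  simp

theorem pvFlag_true (line : String) : pvFlag true line = true := by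
  unfold pvFlag; split <;> rfl

theorem pvLoopA_true (lines : List String) (pub priv : List String) :
    lines.foldl pvStepA (true, pub, priv) = (true, pub, priv ++ lines.filterMap pvKeep) := by
  induction lines generalizing priv with
  | nil => simp
  | cons l ls ih =>
    rw [List.foldl_cons, pvStepA_of_flag_true true pub priv l (pvFlag_true l), ih]
    cases hk : pvKeep l <;> simp [hk]

theorem pvLoopA_false (lines : List String) (pub priv : List String) :
    (lines.foldl pvStepA (false, pub, priv)).2 =
      (pub ++ ((lines.take (lines.findIdx (fun l => PySem.Str.isIn "===BEGIN PRIVATE DOMAINS===" l))).filterMap pvKeep),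
       priv ++ ((lines.drop (lines.findIdx (fun l => PySem.Str.isIn "===BEGIN PRIVATE DOMAINS===" l))).filterMap pvKeep)) := by
  induction lines generalizing pub with
  | nil => simp
  | cons l ls ih =>
    by_cases h : PySem.Str.isIn "===BEGIN PRIVATE DOMAINS===" l = true
    · have hf : pvFlag false l = true := by unfold pvFlag; rw [h]; rfl
      rw [List.foldl_cons, pvStepA_of_flag_true false pub priv l hf, pvLoopA_true]
      simp only [List.findIdx_cons, h, cond_true, List.take_zero, List.drop_zero,
        List.filterMap_nil, List.append_nil]
      cases hk : pvKeep l <;> simp [hk]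
    · have hb : PySem.Str.isIn "===BEGIN PRIVATE DOMAINS===" l = false := by
        cases hx : PySem.Str.isIn "===BEGIN PRIVATE DOMAINS===" l
        · rfl
        · exact absurd hx h
      have hf : pvFlag false l = false := by unfold pvFlag; rw [hb]; rfl
      rw [List.foldl_cons, pvStepA_of_flag_false false pub priv l hf, ih]
      simp only [List.findIdx_cons, hb, cond_false, List.take_succ_cons, List.drop_succ_cons]
      cases hk : pvKeep l <;> simp [hk, List.append_assoc]

-- ===== VERDICT (by name: the statement is the Claim_ definition above) =====
theorem get_suffix_lists_spec : Claim_equal_get_suffix_lists := by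
  intro txt _
  show get_suffix_lists txt = get_suffix_lists_alt txt
  show (((PySem.Str.split? txt "\n").getD []).foldl pvStepA (false, [], [])).2 = _
  rw [pvLoopA_false]
  simp only [List.nil_append]
  rfl
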